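-- pv_equiv track=rewrite | github.com/GeniaHarrietBoeing/Rosalind | GS.py | naive_check_general_sink
-- ===== SOURCE A (Python) =====
-- def explore(A, visited, i):
--     visited[i] = True
--     for j in range(1, len(A)):
--         if not visited[j] and A[i][j] == 1:
--             visited = explore(A, visited, j)
--     return visited
--
-- def naive_check_general_sink(A):
--     for i in range(1, len(A)):
--         visited = [False] * len(A)
--         visited[0] = True
--         visited = explore(A, visited, i)
--         if sum(visited) == len(visited):
--             return i
--     return -1
-- ===== SOURCE B (Python) =====
-- def naive_check_general_sink(A):
--     n = len(A)
--     # static successor lists on nodes 1..n-1 (node 0 plays no role: it is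
--     # pre-visited and never entered, and column 0 is never inspected)
--     succ = [[j for j in range(1, n) if i > 0 and A[i][j] == 1] for i in range(n)]
--     # global reachability closure by n rounds of breadth saturation:
--     # after round m, reach[i] holds every node within distance 2^0+..<=m of i;
--     # n rounds reach the fixed point (sets over {1..n-1} cannot grow n+1 times)
--     reach = [{i} if i > 0 else set() for i in range(n)]
--     for _ in range(n):
--         reach = [s | {k for j in s for k in succ[j]} for s in reach]
--     full = set(range(1, n))
--     for i in range(1, n):
--         if reach[i] >= full:
--             return i
--     return -1
-- ===== Notes on version B (the rewrite author's own statement) =====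
-- stated objective: alternative
-- what changed: A runs a recursive depth-first search from each candidate source in turn; B instead precomputes static successor lists once, builds the full reachability closure of all nodes simultaneously by n rounds of set saturation, and then scans for the first node whose reach set covers {1..n-1}.
-- outside the precondition, e.g. on naive_check_general_sink([[0, 0], [1]]): A returns 1, B raises IndexError
import Mathlib
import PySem

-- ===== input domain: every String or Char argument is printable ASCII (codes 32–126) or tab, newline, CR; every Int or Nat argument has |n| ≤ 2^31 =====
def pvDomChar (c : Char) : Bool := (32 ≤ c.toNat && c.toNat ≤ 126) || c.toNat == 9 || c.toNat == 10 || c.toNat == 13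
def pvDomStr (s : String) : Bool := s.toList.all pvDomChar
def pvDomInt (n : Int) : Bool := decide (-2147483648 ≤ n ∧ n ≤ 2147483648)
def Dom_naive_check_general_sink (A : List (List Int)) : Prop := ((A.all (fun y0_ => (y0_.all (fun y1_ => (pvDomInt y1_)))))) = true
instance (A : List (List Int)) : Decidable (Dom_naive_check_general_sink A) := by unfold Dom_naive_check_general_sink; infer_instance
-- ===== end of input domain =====

-- B replaces A's per-candidate recursive DFS by one global set-saturation
-- reachability closure followed by a scan (objective: alternative algorithm).

-- ===== PORT A =====
-- 'explore' with a fuel argument that only makes the recursion total: the DFS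
-- recursion depth is bounded by the number of unvisited nodes, so the initial
-- fuel A.length + 1 is never exhausted (proved in the lemmas below).
-- Indexing A[i][j] is ported as getD (indices are nonnegative and, inside
-- Pre_, always in range, where getD equals Python's indexing).
def pvExploreA (A : List (List Int)) : Nat → List Bool → Nat → List Bool
  | 0, v, _ => v
  | f + 1, v, i =>
    (List.range' 1 (A.length - 1)).foldl
      (fun w j =>
        if !(w.getD j false) && ((A.getD i []).getD j 0 == 1)
        then pvExploreA A f w j else w)
      (v.set i true)

-- the outer 'for i in range(1, len(A)) … return i' loop with early return
def pvScanA (A : List (List Int)) : List Nat → Int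
  | [] => -1
  | i :: rest =>
    let v := pvExploreA A (A.length + 1) ((List.replicate A.length false).set 0 true) i
    if v.foldl (fun s b => s + (if b then (1 : Int) else 0)) 0 == (v.length : Int)
    then (i : Int) else pvScanA A rest

def naive_check_general_sink (A : List (List Int)) : Int :=
  pvScanA A (List.range' 1 (A.length - 1))

-- ===== PORT B =====
-- succ = [[j for j in range(1, n) if i > 0 and A[i][j] == 1] for i in range(n)]
def pvSuccB (A : List (List Int)) : List (List Nat) :=
  (List.range A.length).map (fun i =>
    (List.range' 1 (A.length - 1)).filter
      (fun j => decide (0 < i) && ((A.getD i []).getD j 0 == 1)))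

-- s | {k for j in s for k in succ[j]}  (the comprehension builds a set from a
-- set, which is order-independent; ported as Set.ofList of the flattened list)
def pvStepB (succ : List (List Nat)) (s : PySem.Set Nat) : PySem.Set Nat :=
  PySem.Set.union s (PySem.Set.ofList (s.flatMap (fun j => succ.getD j [])))

-- reach = [{i} if i > 0 else set() for i in range(n)]
def pvReach0 (A : List (List Int)) : List (PySem.Set Nat) :=
  (List.range A.length).map (fun i => if 0 < i then [i] else [])

-- for _ in range(n): reach = [s | … for s in reach]
def pvRoundsB (A : List (List Int)) : List (PySem.Set Nat) :=
  (List.range A.length).foldl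
    (fun r _ => r.map (pvStepB (pvSuccB A))) (pvReach0 A)

def naive_check_general_sink_alt (A : List (List Int)) : Int :=
  let n := A.length
  let reach := pvRoundsB A
  -- full = set(range(1, n)): the range list is duplicate-free, so it is its own set
  let full : PySem.Set Nat := List.range' 1 (n - 1)
  -- for i in range(1, n): if reach[i] >= full: return i / return -1
  match (List.range' 1 (n - 1)).find?
      (fun i => PySem.Set.issuperset (reach.getD i []) full) with
  | some i => (i : Int)
  | none => -1

-- ===== PRECONDITION & SPEC =====
-- Pre_ excludes inputs with a row shorter than len(A) among rows 1..len(A)-1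
-- (row 0 is never inspected by either program): there A's short-circuited
-- indexing A[i][j] raises IndexError unless the visit order happens to skip
-- every missing entry, and B itself always raises IndexError there, since its
-- precomputation reads each of those rows up front.
def Pre_naive_check_general_sink (A : List (List Int)) : Prop :=
  ∀ row ∈ A.tail, A.length ≤ row.length
instance (A : List (List Int)) : Decidable (Pre_naive_check_general_sink A) := by
  unfold Pre_naive_check_general_sink; infer_instance

def pvWitness_naive_check_general_sink : List (List Int) := [[0, 1], [1, 0]]

def Spec_naive_check_general_sink (A : List (List Int)) (out : Int) : Prop := out = naive_check_general_sink_alt A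
instance (A : List (List Int)) (out : Int) : Decidable (Spec_naive_check_general_sink A out) := by unfold Spec_naive_check_general_sink; infer_instance

-- ===== CLAIM (what is proved, stated in full; the proofs are below) =====
def Claim_equal_naive_check_general_sink : Prop := ∀ (A : List (List Int)), Dom_naive_check_general_sink A → Pre_naive_check_general_sink A → Spec_naive_check_general_sink A (naive_check_general_sink A)

-- ===== LEMMAS AND PROOFS =====

-- The common mathematical spec both ports are reduced to: one-step edges and
-- reachability on nodes 1..n-1 (column 0 is never inspected by either port).
def pvEdge (A : List (List Int)) (u v : Nat) : Prop :=
  1 ≤ v ∧ v < A.length ∧ (A.getD u []).getD v 0 = 1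

def pvReach (A : List (List Int)) : Nat → Nat → Prop :=
  Relation.ReflTransGen (pvEdge A)


-- basic List Bool access/count helpers
def pvGb (v : List Bool) (k : Nat) : Bool := v.getD k false

lemma pvGb_set_self (v : List Bool) (i : Nat) (h : i < v.length) :
    pvGb (v.set i true) i = true := by
  unfold pvGb; simp [List.getD, List.getElem?_set, h]

lemma pvGb_set_true_of (v : List Bool) (i k : Nat) (h : pvGb v k = true) :
    pvGb (v.set i true) k = true := by
  by_cases hik : i = k
  · subst hik
    by_cases hl : i < v.length
    · exact pvGb_set_self v i hl
    · rw [List.set_eq_of_length_le (by omega)]; exact h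
  · unfold pvGb at *
    simpa [List.getD, List.getElem?_set, hik] using h

lemma pvGb_of_set_true (v : List Bool) (i k : Nat) (h : pvGb (v.set i true) k = true) :
    k = i ∨ pvGb v k = true := by
  unfold pvGb at *
  by_cases hik : i = k
  · exact Or.inl hik.symm
  · right; simpa [List.getD, List.getElem?_set, hik] using h

lemma pvGb_eq_getElem (v : List Bool) (k : Nat) (h : k < v.length) :
    pvGb v k = v[k] := by
  unfold pvGb; simp [List.getD, List.getElem?_eq_getElem h]

-- counting
lemma pvCount_set (w : List Bool) (j : Nat) (hj : j < w.length) (hf : pvGb w j = false) :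
    (w.set j true).count false + 1 = w.count false := by
  induction w generalizing j with
  | nil => simp at hj
  | cons b w ih =>
    cases j with
    | zero =>
      have : b = false := by simpa [pvGb, List.getD] using hf
      subst this; simp [List.count_cons]
    | succ j =>
      have hj' : j < w.length := by simpa using hj
      have hf' : pvGb w j = false := by simpa [pvGb, List.getD] using hf
      have := ih j hj' hf'
      simp [List.set_cons_succ, List.count_cons]
      omega

lemma pvCount_false_pos (w : List Bool) (j : Nat) (hj : j < w.length) (hf : pvGb w j = false) :
    1 ≤ w.count false := by
  have : false ∈ w := by
    rw [pvGb_eq_getElem w j hj] at hf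
    exact hf ▸ List.getElem_mem hj
  exact List.count_pos_iff.mpr this

lemma pvCount_le_of_pointwise (v w : List Bool) (hl : v.length = w.length)
    (h : ∀ k, pvGb v k = true → pvGb w k = true) :
    w.count false ≤ v.count false := by
  induction v generalizing w with
  | nil => cases w <;> simp_all
  | cons a v ih =>
    cases w with
    | nil => simp at hl
    | cons b w =>
      have hl' : v.length = w.length := by simpa using hl
      have htail : ∀ k, pvGb v k = true → pvGb w k = true := by
        intro k hk
        have := h (k+1) (by simpa [pvGb, List.getD] using hk)
        simpa [pvGb, List.getD] using this
      have hhead : a = true → b = true := by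
        intro ha
        have := h 0 (by simpa [pvGb, List.getD] using ha)
        simpa [pvGb, List.getD] using this
      have hle := ih w hl' htail
      rcases Bool.eq_false_or_eq_true a with ha | ha
      · subst ha
        have hb := hhead rfl; subst hb
        simpa using hle
      · subst ha
        have e1 : (false :: v).count false = v.count false + 1 := by simp
        have e2 : (b :: w).count false ≤ w.count false + 1 := by cases b <;> simp
        omega

lemma pvCount_all_true (w : List Bool) :
    (w.count true = w.length) ↔ (∀ k, k < w.length → pvGb w k = true) := by
  rw [List.count_eq_length]
  constructor
  · intro h k hk; rw [pvGb_eq_getElem w k hk]; exact (h _ (List.getElem_mem hk)).symm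
  · intro h b hb
    obtain ⟨k, hk, rfl⟩ := List.mem_iff_getElem.mp hb
    rw [← pvGb_eq_getElem w k hk]; exact (h k hk).symm

lemma pvSumFold (v : List Bool) (s : Int) :
    v.foldl (fun s b => s + (if b then (1 : Int) else 0)) s = s + (v.count true : Int) := by
  induction v generalizing s with
  | nil => simp
  | cons b v ih => cases b <;> simp [ih, List.count_cons] <;> push_cast <;> ring

-- explore lemmas
def pvStepA (A : List (List Int)) (f : Nat) (i : Nat) : List Bool → Nat → List Bool :=
  fun w j => if !(w.getD j false) && ((A.getD i []).getD j 0 == 1)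
             then pvExploreA A f w j else w

lemma pvExploreA_succ (A : List (List Int)) (f : Nat) (v : List Bool) (i : Nat) :
    pvExploreA A (f + 1) v i
      = (List.range' 1 (A.length - 1)).foldl (pvStepA A f i) (v.set i true) := rfl

lemma pvExploreA_length (A : List (List Int)) :
    ∀ (f : Nat) (v : List Bool) (i : Nat), (pvExploreA A f v i).length = v.length := by
  intro f
  induction f with
  | zero => intro v i; rfl
  | succ f ih =>
    intro v i
    rw [pvExploreA_succ]
    have H : ∀ (l : List Nat) (w : List Bool),
        (l.foldl (pvStepA A f i) w).length = w.length := by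
      intro l
      induction l with
      | nil => intro w; rfl
      | cons j l ihl =>
        intro w
        rw [List.foldl_cons]
        rw [ihl]
        unfold pvStepA
        split
        · exact ih w j
        · rfl
    rw [H, List.length_set]

lemma pvExploreA_mono (A : List (List Int)) :
    ∀ (f : Nat) (v : List Bool) (i k : Nat),
      pvGb v k = true → pvGb (pvExploreA A f v i) k = true := by
  intro f
  induction f with
  | zero => intro v i k h; exact h
  | succ f ih =>
    intro v i k h
    rw [pvExploreA_succ]
    have H : ∀ (l : List Nat) (w : List Bool),
        pvGb w k = true → pvGb (l.foldl (pvStepA A f i) w) k = true := by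
      intro l
      induction l with
      | nil => intro w hw; exact hw
      | cons j l ihl =>
        intro w hw
        rw [List.foldl_cons]
        apply ihl
        unfold pvStepA
        split
        · exact ih w j k hw
        · exact hw
    exact H _ _ (pvGb_set_true_of v i k h)

lemma pvFoldA_mono (A : List (List Int)) (f i : Nat) (l : List Nat) :
    ∀ (w : List Bool) (k : Nat),
      pvGb w k = true → pvGb (l.foldl (pvStepA A f i) w) k = true := by
  induction l with
  | nil => intro w k hw; exact hw
  | cons j l ihl =>
    intro w k hw
    rw [List.foldl_cons]
    apply ihl
    unfold pvStepA
    split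
    · exact pvExploreA_mono A f w j k hw
    · exact hw

lemma pvExploreA_self (A : List (List Int)) (f : Nat) (v : List Bool) (i : Nat)
    (hf : 1 ≤ f) (hi : i < v.length) :
    pvGb (pvExploreA A f v i) i = true := by
  obtain ⟨f, rfl⟩ : ∃ f', f = f' + 1 := ⟨f - 1, by omega⟩
  rw [pvExploreA_succ]
  exact pvFoldA_mono A f i _ _ i (pvGb_set_self v i hi)

lemma pvExploreA_sound (A : List (List Int)) :
    ∀ (f : Nat) (v : List Bool) (i k : Nat),
      pvGb (pvExploreA A f v i) k = true → pvGb v k = true ∨ pvReach A i k := by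
  intro f
  induction f with
  | zero => intro v i k h; exact Or.inl h
  | succ f ih =>
    intro v i k h
    rw [pvExploreA_succ] at h
    have H : ∀ (l : List Nat) (w : List Bool),
        (∀ j ∈ l, 1 ≤ j ∧ j < A.length) →
        (∀ k', pvGb w k' = true → pvGb v k' = true ∨ pvReach A i k') →
        pvGb (l.foldl (pvStepA A f i) w) k = true →
        pvGb v k = true ∨ pvReach A i k := by
      intro l
      induction l with
      | nil => intro w _ hInv hk; exact hInv k hk
      | cons j l ihl =>
        intro w hb hInv hk
        rw [List.foldl_cons] at hk
        refine ihl _ (fun x hx => hb x (List.mem_cons_of_mem _ hx)) ?_ hk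
        intro k' hk'
        unfold pvStepA at hk'
        split at hk'
        · rename_i hguard
          have hedge : pvEdge A i j := by
            have hb' := hb j List.mem_cons_self
            have : ((A.getD i []).getD j 0 == 1) = true := by
              cases h1 : (w.getD j false) <;> cases h2 : ((A.getD i []).getD j 0 == 1) <;>
                simp_all
            exact ⟨hb'.1, hb'.2, by simpa using this⟩
          rcases ih w j k' hk' with hw | hr
          · exact hInv k' hw
          · exact Or.inr (Relation.ReflTransGen.head hedge hr)
        · exact hInv k' hk'
    apply H _ _ ?_ ?_ h
    · intro j hj
      have := List.mem_range'_1.mp hj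
      omega
    · intro k' hk'
      rcases pvGb_of_set_true v i k' hk' with rfl | hv
      · exact Or.inr Relation.ReflTransGen.refl
      · exact Or.inl hv

-- closedness: after exploring i with enough fuel, every newly marked node has
-- all its successors marked
lemma pvFoldA_closed (A : List (List Int)) (f : Nat) (v : List Bool) (i : Nat)
    (_hv : v.length = A.length)
    (ihf : ∀ (v' : List Bool) (i' : Nat), v'.length = A.length →
      (v'.set i' true).count false < f →
      ∀ u j, pvGb (pvExploreA A f v' i') u = true → pvGb v' u = false →
        pvEdge A u j → pvGb (pvExploreA A f v' i') j = true)
    (hcnt0 : (v.set i true).count false ≤ f) :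
    ∀ (l : List Nat) (acc : List Bool),
      acc.length = A.length →
      acc.count false ≤ (v.set i true).count false →
      (∀ j ∈ l, 1 ≤ j ∧ j < A.length) →
      (∀ u j, pvGb acc u = true → pvGb v u = false → u ≠ i → pvEdge A u j →
        pvGb acc j = true) →
      (∀ u j, pvGb (l.foldl (pvStepA A f i) acc) u = true → pvGb v u = false →
          u ≠ i → pvEdge A u j → pvGb (l.foldl (pvStepA A f i) acc) j = true)
      ∧ (∀ j0 ∈ l, pvEdge A i j0 → pvGb (l.foldl (pvStepA A f i) acc) j0 = true) := by
  intro l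
  induction l with
  | nil =>
    intro acc _ _ _ hclosed
    exact ⟨fun u j hu hvu hui he => hclosed u j hu hvu hui he, fun j0 h => absurd h (by simp)⟩
  | cons j0 l ihl =>
    intro acc hlen hcnt hb hclosed
    have hb0 := hb j0 List.mem_cons_self
    rw [List.foldl_cons]
    by_cases hguard : (!(acc.getD j0 false) && ((A.getD i []).getD j0 0 == 1)) = true
    · -- guard true: recursive explore call on j0
      have hacc0 : pvGb acc j0 = false := by
        unfold pvGb
        cases h1 : acc.getD j0 false
        · rfl
        · rw [h1] at hguard; simp at hguard
      have hj0len : j0 < acc.length := by omega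
      have hcntset : (acc.set j0 true).count false + 1 = acc.count false :=
        pvCount_set acc j0 hj0len hacc0
      have hpos : 1 ≤ acc.count false := pvCount_false_pos acc j0 hj0len hacc0
      have hfuel : (acc.set j0 true).count false < f := by omega
      set acc' := pvExploreA A f acc j0 with hacc'
      have hlen' : acc'.length = A.length := by rw [hacc', pvExploreA_length]; exact hlen
      have hmono : ∀ k, pvGb acc k = true → pvGb acc' k = true :=
        fun k hk => pvExploreA_mono A f acc j0 k hk
      have hcnt' : acc'.count false ≤ acc.count false :=
        pvCount_le_of_pointwise acc acc' (by omega) hmono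
      have hstep : pvStepA A f i acc j0 = acc' := by unfold pvStepA; rw [if_pos hguard]
      rw [hstep]
      have hclosed' : ∀ u j, pvGb acc' u = true → pvGb v u = false → u ≠ i →
          pvEdge A u j → pvGb acc' j = true := by
        intro u j hu hvu hui he
        by_cases haccu : pvGb acc u = true
        · exact hmono j (hclosed u j haccu hvu hui he)
        · exact ihf acc j0 hlen hfuel u j hu (by simpa using haccu) he
      have hres := ihl acc' hlen' (by omega)
        (fun x hx => hb x (List.mem_cons_of_mem _ hx)) hclosed'
      refine ⟨hres.1, ?_⟩
      intro x hx hex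
      rcases List.mem_cons.mp hx with rfl | hx'
      · -- x = j0: the nested call marked it
        have : pvGb acc' x = true := by
          rw [hacc']
          exact pvExploreA_self A f acc x (by omega) hj0len
        exact pvFoldA_mono A f i l acc' x this
      · exact hres.2 x hx' hex
    · -- guard false
      have hstep : pvStepA A f i acc j0 = acc := by unfold pvStepA; rw [if_neg hguard]
      rw [hstep]
      have hres := ihl acc hlen hcnt (fun x hx => hb x (List.mem_cons_of_mem _ hx)) hclosed
      refine ⟨hres.1, ?_⟩
      intro x hx hex
      rcases List.mem_cons.mp hx with rfl | hx'
      · -- Edge i x holds, guard false ⇒ x already marked in acc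
        have hbeq : ((A.getD i []).getD x 0 == 1) = true := by simpa using hex.2.2
        have : pvGb acc x = true := by
          cases h1 : acc.getD x false
          · exfalso; exact hguard (by rw [h1, hbeq]; rfl)
          · simpa [pvGb] using h1
        exact pvFoldA_mono A f i l acc x this
      · exact hres.2 x hx' hex

lemma pvExploreA_closed (A : List (List Int)) :
    ∀ (f : Nat) (v : List Bool) (i : Nat), v.length = A.length →
      (v.set i true).count false < f →
      ∀ u j, pvGb (pvExploreA A f v i) u = true → pvGb v u = false →
        pvEdge A u j → pvGb (pvExploreA A f v i) j = true := by
  intro f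
  induction f with
  | zero => intro v i _ hf; omega
  | succ f ihf =>
    intro v i hv hf u j hu hvu he
    rw [pvExploreA_succ] at hu ⊢
    have hinit : ∀ u' j', pvGb (v.set i true) u' = true → pvGb v u' = false →
        u' ≠ i → pvEdge A u' j' → pvGb (v.set i true) j' = true := by
      intro u' j' hu' hvu' hui' _
      rcases pvGb_of_set_true v i u' hu' with rfl | hvv
      · exact absurd rfl hui'
      · rw [hvv] at hvu'; exact absurd hvu' (by simp)
    have H := pvFoldA_closed A f v i hv ihf (by omega) (List.range' 1 (A.length - 1))
      (v.set i true) (by rw [List.length_set]; exact hv) le_rfl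
      (fun x hx => by have := List.mem_range'_1.mp hx; omega) hinit
    by_cases hui : u = i
    · subst hui
      have hmem : j ∈ List.range' 1 (A.length - 1) := by
        rw [List.mem_range'_1]
        obtain ⟨h1, h2, _⟩ := he
        omega
      exact H.2 j hmem he
    · exact H.1 u j hu hvu hui he

-- the initial visited list [False]*n with visited[0]=True
def pvV0 (n : Nat) : List Bool := (List.replicate n false).set 0 true

lemma pvV0_length (n : Nat) : (pvV0 n).length = n := by
  unfold pvV0; simp

lemma pvGb_pvV0 (n k : Nat) : pvGb (pvV0 n) k = true ↔ (k = 0 ∧ 0 < n) := by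
  unfold pvV0 pvGb
  constructor
  · intro h
    by_cases hk : k = 0
    · subst hk
      by_cases hn : 0 < n
      · exact ⟨rfl, hn⟩
      · exfalso
        have : n = 0 := by omega
        subst this; simp [List.getD] at h
    · exfalso
      rw [List.getD, List.getElem?_set_ne (by omega)] at h
      by_cases hk2 : k < n
      · simp [List.getElem?_replicate, hk2] at h
      · rw [List.getElem?_eq_none_iff.mpr (by simpa using by omega : (List.replicate n false).length ≤ k)] at h
        simp at h
  · rintro ⟨rfl, hn⟩
    rw [List.getD, List.getElem?_set_self (by simpa using hn)]
    simp

-- the boolean test A performs for candidate i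
def pvTestA (A : List (List Int)) (i : Nat) : Bool :=
  let v := pvExploreA A (A.length + 1) (pvV0 A.length) i
  v.foldl (fun s b => s + (if b then (1 : Int) else 0)) 0 == (v.length : Int)

lemma pvScanA_cons (A : List (List Int)) (i : Nat) (rest : List Nat) :
    pvScanA A (i :: rest) = if pvTestA A i then (i : Int) else pvScanA A rest := by
  show (if (_ == _) then _ else _) = _
  unfold pvTestA
  rfl

lemma pvTestA_iff (A : List (List Int)) (i : Nat) (hi1 : 1 ≤ i) (hi2 : i < A.length) :
    pvTestA A i = true ↔ (∀ k, 1 ≤ k → k < A.length → pvReach A i k) := by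
  set n := A.length with hn
  set r := pvExploreA A (n + 1) (pvV0 n) i with hr
  have hrlen : r.length = n := by rw [hr, pvExploreA_length, pvV0_length]
  have hfuel : ((pvV0 n).set i true).count false < n + 1 := by
    calc ((pvV0 n).set i true).count false ≤ ((pvV0 n).set i true).length := List.count_le_length
    _ = n := by rw [List.length_set, pvV0_length]
    _ < n + 1 := by omega
  have htest : pvTestA A i = true ↔ (r.count true = r.length) := by
    unfold pvTestA
    rw [← hr]
    show (List.foldl (fun s b => s + (if b then (1 : Int) else 0)) 0 r == (r.length : Int)) = true ↔ _
    rw [pvSumFold]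
    simp
  rw [htest, hrlen]
  have hchar : r.count true = n ↔ ∀ k, k < n → pvGb r k = true := by
    rw [← hrlen, pvCount_all_true, hrlen]
  rw [hchar]
  constructor
  · intro hall k h1 h2
    have := pvExploreA_sound A (n + 1) (pvV0 n) i k (by rw [← hr]; exact hall k h2)
    rcases this with hv | hreach
    · rw [pvGb_pvV0] at hv; omega
    · exact hreach
  · intro hreach k hk
    by_cases hk0 : k = 0
    · subst hk0
      rw [hr]
      exact pvExploreA_mono A (n + 1) (pvV0 n) i 0 ((pvGb_pvV0 n 0).mpr ⟨rfl, by omega⟩)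
    · -- k ≥ 1: k is reachable from i; DFS marks it (completeness)
      have hcomplete : ∀ k', pvReach A i k' → pvGb r k' = true ∧ 1 ≤ k' := by
        intro k' hk'
        induction hk' with
        | refl =>
          constructor
          · rw [hr]
            exact pvExploreA_self A (n + 1) (pvV0 n) i (by omega) (by rw [pvV0_length]; omega)
          · exact hi1
        | @tail m k'' hmid hedge ihm =>
          obtain ⟨hrm, hm1⟩ := ihm
          constructor
          · rw [hr]
            apply pvExploreA_closed A (n + 1) (pvV0 n) i (pvV0_length n) hfuel m k''
            · rw [← hr]; exact hrm
            · cases hmv : pvGb (pvV0 n) m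
              · rfl
              · rw [pvGb_pvV0] at hmv; omega
            · exact hedge
          · exact hedge.1
      exact (hcomplete k (hreach k (by omega) hk)).1

-- B-side: the m-th saturation round
def pvIter (A : List (List Int)) : Nat → List (PySem.Set Nat)
  | 0 => pvReach0 A
  | m + 1 => (pvIter A m).map (pvStepB (pvSuccB A))

lemma pvRoundsB_eq (A : List (List Int)) : pvRoundsB A = pvIter A A.length := by
  unfold pvRoundsB
  have aux : ∀ m, (List.range m).foldl
      (fun r _ => r.map (pvStepB (pvSuccB A))) (pvReach0 A) = pvIter A m := by
    intro m
    induction m with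
    | zero => rfl
    | succ m ih => rw [List.range_succ, List.foldl_append, ih]; rfl
  exact aux A.length

lemma pvIter_length (A : List (List Int)) (m : Nat) : (pvIter A m).length = A.length := by
  induction m with
  | zero => unfold pvIter pvReach0; simp
  | succ m ih => unfold pvIter; rw [List.length_map]; exact ih

def pvS (A : List (List Int)) (i m : Nat) : PySem.Set Nat := (pvIter A m).getD i []

lemma pvS_zero (A : List (List Int)) (i : Nat) (hi : i < A.length) :
    pvS A i 0 = if 0 < i then [i] else [] := by
  unfold pvS pvIter pvReach0
  rw [List.getD, List.getElem?_map, List.getElem?_range hi]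
  rfl

lemma pvS_succ (A : List (List Int)) (i m : Nat) (hi : i < A.length) :
    pvS A i (m + 1) = pvStepB (pvSuccB A) (pvS A i m) := by
  unfold pvS
  show ((pvIter A m).map (pvStepB (pvSuccB A))).getD i [] = _
  have hlt : i < (pvIter A m).length := by rw [pvIter_length]; exact hi
  rw [List.getD, List.getElem?_map, List.getElem?_eq_getElem hlt]
  simp [List.getD, List.getElem?_eq_getElem hlt]

lemma pvMem_succB (A : List (List Int)) (j k : Nat) :
    k ∈ (pvSuccB A).getD j [] ↔ (0 < j ∧ j < A.length ∧ pvEdge A j k) := by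
  unfold pvSuccB
  by_cases hj : j < A.length
  · rw [List.getD, List.getElem?_map, List.getElem?_range hj]
    show k ∈ (List.range' 1 (A.length - 1)).filter _ ↔ _
    rw [List.mem_filter, List.mem_range'_1]
    unfold pvEdge
    constructor
    · rintro ⟨⟨hk1, hk2⟩, hcond⟩
      have := Bool.and_eq_true_iff.mp hcond
      refine ⟨by simpa using this.1, hj, hk1, by omega, by simpa using this.2⟩
    · rintro ⟨h0, _, hk1, hk2, hentry⟩
      refine ⟨⟨hk1, by omega⟩, ?_⟩
      rw [List.getD, List.getD] at hentry
      simp [h0, hentry]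
  · rw [List.getD, List.getElem?_map,
      List.getElem?_eq_none_iff.mpr (by simpa using by omega : (List.range A.length).length ≤ j)]
    simp
    omega

lemma pvMem_step (sc : List (List Nat)) (s : PySem.Set Nat) (k : Nat) :
    k ∈ pvStepB sc s ↔ k ∈ s ∨ ∃ j ∈ s, k ∈ sc.getD j [] := by
  unfold pvStepB
  rw [PySem.Set.mem_union, PySem.Set.mem_ofList, List.mem_flatMap]

lemma pvS_sound (A : List (List Int)) (i : Nat) (hi1 : 1 ≤ i) (hi2 : i < A.length) :
    ∀ m k, k ∈ pvS A i m → pvReach A i k := by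
  intro m
  induction m with
  | zero =>
    intro k hk
    rw [pvS_zero A i hi2, if_pos (by omega)] at hk
    have : k = i := by simpa using hk
    subst this; exact Relation.ReflTransGen.refl
  | succ m ih =>
    intro k hk
    rw [pvS_succ A i m hi2, pvMem_step] at hk
    rcases hk with hk | ⟨j, hj, hkj⟩
    · exact ih k hk
    · have := (pvMem_succB A j k).mp hkj
      exact Relation.ReflTransGen.tail (ih j hj) this.2.2

lemma pvS_bounds (A : List (List Int)) (i : Nat) (hi1 : 1 ≤ i) (hi2 : i < A.length) :
    ∀ m k, k ∈ pvS A i m → 1 ≤ k ∧ k < A.length := by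
  intro m
  induction m with
  | zero =>
    intro k hk
    rw [pvS_zero A i hi2, if_pos (by omega)] at hk
    have : k = i := by simpa using hk
    omega
  | succ m ih =>
    intro k hk
    rw [pvS_succ A i m hi2, pvMem_step] at hk
    rcases hk with hk | ⟨j, hj, hkj⟩
    · exact ih k hk
    · have := (pvMem_succB A j k).mp hkj
      exact ⟨this.2.2.1, this.2.2.2.1⟩

lemma pvS_nodup (A : List (List Int)) (i : Nat) (hi2 : i < A.length) :
    ∀ m, (pvS A i m).Nodup := by
  intro m
  induction m with
  | zero =>
    rw [pvS_zero A i hi2]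
    split <;> simp
  | succ m ih =>
    rw [pvS_succ A i m hi2]
    exact PySem.Set.nodup_union _ _ ih

lemma pvS_mono (A : List (List Int)) (i : Nat) (hi2 : i < A.length) (m k : Nat)
    (hk : k ∈ pvS A i m) : k ∈ pvS A i (m + 1) := by
  rw [pvS_succ A i m hi2, pvMem_step]
  exact Or.inl hk

lemma pvS_mono_le (A : List (List Int)) (i : Nat) (hi2 : i < A.length) (m m' : Nat)
    (h : m ≤ m') (k : Nat) (hk : k ∈ pvS A i m) : k ∈ pvS A i m' := by
  obtain ⟨d, rfl⟩ : ∃ d, m' = m + d := ⟨m' - m, by omega⟩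
  clear h
  induction d with
  | zero => exact hk
  | succ d ih => exact pvS_mono A i hi2 (m + d) k ih

lemma pvStep_ext (sc : List (List Nat)) (s t : PySem.Set Nat)
    (h : ∀ x, x ∈ s ↔ x ∈ t) (x : Nat) :
    x ∈ pvStepB sc s ↔ x ∈ pvStepB sc t := by
  rw [pvMem_step, pvMem_step]
  constructor
  · rintro (hx | ⟨j, hj, hxj⟩)
    · exact Or.inl ((h x).mp hx)
    · exact Or.inr ⟨j, (h j).mp hj, hxj⟩
  · rintro (hx | ⟨j, hj, hxj⟩)
    · exact Or.inl ((h x).mpr hx)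
    · exact Or.inr ⟨j, (h j).mpr hj, hxj⟩

-- a membership-stable round stays stable forever
lemma pvS_propagate (A : List (List Int)) (i : Nat) (hi2 : i < A.length) (m : Nat)
    (h : ∀ x, x ∈ pvS A i (m + 1) ↔ x ∈ pvS A i m) :
    ∀ d x, x ∈ pvS A i (m + d) ↔ x ∈ pvS A i m := by
  intro d
  induction d with
  | zero => intro x; rfl
  | succ d ih =>
    intro x
    have : m + (d + 1) = (m + d) + 1 := by omega
    rw [this, pvS_succ A i (m + d) hi2]
    have e1 : x ∈ pvStepB (pvSuccB A) (pvS A i (m + d)) ↔ x ∈ pvStepB (pvSuccB A) (pvS A i m) :=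
      pvStep_ext _ _ _ ih x
    rw [e1, ← pvS_succ A i m hi2]
    exact h x

lemma pvS_len_le (A : List (List Int)) (i : Nat) (hi1 : 1 ≤ i) (hi2 : i < A.length)
    (m : Nat) : (pvS A i m).length ≤ A.length := by
  have hnd := pvS_nodup A i hi2 m
  have hsub : (pvS A i m).toFinset ⊆ Finset.range A.length := by
    intro x hx
    rw [List.mem_toFinset] at hx
    rw [Finset.mem_range]
    exact (pvS_bounds A i hi1 hi2 m x hx).2
  calc (pvS A i m).length = (pvS A i m).toFinset.card := (List.toFinset_card_of_nodup hnd).symm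
  _ ≤ (Finset.range A.length).card := Finset.card_le_card hsub
  _ = A.length := Finset.card_range _

lemma pvS_grow (A : List (List Int)) (i : Nat) (hi2 : i < A.length) (m : Nat)
    (h : ¬ ∀ x, x ∈ pvS A i (m + 1) ↔ x ∈ pvS A i m) :
    (pvS A i m).length < (pvS A i (m + 1)).length := by
  push_neg at h
  obtain ⟨x, hx⟩ := h
  have hxm : x ∈ pvS A i (m + 1) ∧ x ∉ pvS A i m := by
    rcases hx with ⟨h1, h2⟩ | ⟨h1, h2⟩
    · exact ⟨h1, h2⟩
    · exact absurd (pvS_mono A i hi2 m x h2) h1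
  have hnd := pvS_nodup A i hi2 m
  have hnd' := pvS_nodup A i hi2 (m + 1)
  have hsub : (pvS A i m).toFinset ⊂ (pvS A i (m + 1)).toFinset := by
    constructor
    · intro y hy
      rw [List.mem_toFinset] at *
      exact pvS_mono A i hi2 m y hy
    · intro hcon
      exact hxm.2 (List.mem_toFinset.mp (hcon (List.mem_toFinset.mpr hxm.1)))
  calc (pvS A i m).length = (pvS A i m).toFinset.card := (List.toFinset_card_of_nodup hnd).symm
  _ < (pvS A i (m + 1)).toFinset.card := Finset.card_lt_card hsub
  _ = (pvS A i (m + 1)).length := List.toFinset_card_of_nodup hnd'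

lemma pvS_fixpoint_exists (A : List (List Int)) (i : Nat) (hi1 : 1 ≤ i) (hi2 : i < A.length) :
    ∃ m < A.length, ∀ x, x ∈ pvS A i (m + 1) ↔ x ∈ pvS A i m := by
  by_contra hcon
  have hcon' : ∀ m, m < A.length → ¬ (∀ x, x ∈ pvS A i (m + 1) ↔ x ∈ pvS A i m) := by
    intro m hm hall
    exact hcon ⟨m, hm, hall⟩
  have hlow : ∀ m, m ≤ A.length → m + 1 ≤ (pvS A i m).length := by
    intro m
    induction m with
    | zero =>
      intro _
      rw [pvS_zero A i hi2, if_pos (by omega)]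
      simp
    | succ m ih =>
      intro hm
      have h1 := ih (by omega)
      have h2 := pvS_grow A i hi2 m (hcon' m (by omega))
      omega
  have := hlow A.length le_rfl
  have := pvS_len_le A i hi1 hi2 A.length
  omega

lemma pvS_complete (A : List (List Int)) (i : Nat) (hi1 : 1 ≤ i) (hi2 : i < A.length)
    (k : Nat) (hk : pvReach A i k) : k ∈ pvS A i A.length := by
  have step1 : ∃ p, k ∈ pvS A i p := by
    induction hk with
    | refl =>
      refine ⟨0, ?_⟩
      rw [pvS_zero A i hi2, if_pos (by omega)]
      simp
    | @tail m k'' hmid hedge ihm =>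
      obtain ⟨p, hp⟩ := ihm
      have hb := pvS_bounds A i hi1 hi2 p m hp
      refine ⟨p + 1, ?_⟩
      rw [pvS_succ A i p hi2, pvMem_step]
      exact Or.inr ⟨m, hp, (pvMem_succB A m k'').mpr ⟨by omega, hb.2, hedge⟩⟩
  obtain ⟨p, hp⟩ := step1
  obtain ⟨m, hm, heq⟩ := pvS_fixpoint_exists A i hi1 hi2
  by_cases hpn : p ≤ A.length
  · exact pvS_mono_le A i hi2 p A.length hpn k hp
  · have h1 : k ∈ pvS A i m := by
      have : p = m + (p - m) := by omega
      rw [this] at hp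
      exact (pvS_propagate A i hi2 m heq (p - m) k).mp hp
    exact pvS_mono_le A i hi2 m A.length (by omega) k h1

def pvTestB (A : List (List Int)) (i : Nat) : Bool :=
  PySem.Set.issuperset ((pvRoundsB A).getD i []) (List.range' 1 (A.length - 1))

lemma pvAlt_eq (A : List (List Int)) :
    naive_check_general_sink_alt A
      = (match (List.range' 1 (A.length - 1)).find? (pvTestB A) with
         | some i => (i : Int)
         | none => -1) := rfl

lemma pvTestB_iff (A : List (List Int)) (i : Nat) (hi1 : 1 ≤ i) (hi2 : i < A.length) :
    pvTestB A i = true ↔ (∀ k, 1 ≤ k → k < A.length → pvReach A i k) := by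
  unfold pvTestB
  rw [pvRoundsB_eq, PySem.Set.issuperset_iff]
  constructor
  · intro h k h1 h2
    exact pvS_sound A i hi1 hi2 A.length k (h k (List.mem_range'_1.mpr ⟨h1, by omega⟩))
  · intro h k hk
    have := List.mem_range'_1.mp hk
    exact pvS_complete A i hi1 hi2 k (h k this.1 (by omega))

lemma pvTest_eq (A : List (List Int)) (i : Nat) (hi1 : 1 ≤ i) (hi2 : i < A.length) :
    pvTestA A i = pvTestB A i := by
  rw [Bool.eq_iff_iff, pvTestA_iff A i hi1 hi2, pvTestB_iff A i hi1 hi2]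

lemma pvScan_find (A : List (List Int)) :
    ∀ l : List Nat, (∀ i ∈ l, pvTestA A i = pvTestB A i) →
      pvScanA A l = (match l.find? (pvTestB A) with
                     | some i => (i : Int)
                     | none => -1) := by
  intro l
  induction l with
  | nil => intro _; rfl
  | cons i rest ih =>
    intro h
    rw [pvScanA_cons, List.find?_cons]
    rw [h i List.mem_cons_self]
    cases hB : pvTestB A i
    · simp only [Bool.false_eq_true, if_false, cond_false]
      exact ih (fun x hx => h x (List.mem_cons_of_mem _ hx))
    · simp

lemma pvPortsAgree : ∀ (A : List (List Int)),
    naive_check_general_sink A = naive_check_general_sink_alt A := by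
  intro A
  show pvScanA A (List.range' 1 (A.length - 1)) = _
  rw [pvAlt_eq]
  apply pvScan_find
  intro i hi
  have := List.mem_range'_1.mp hi
  exact pvTest_eq A i this.1 (by omega)

-- ===== VERDICT (by name: the statement is the Claim_ definition above) =====
theorem naive_check_general_sink_spec : Claim_equal_naive_check_general_sink := by
  intro A _ _
  unfold Spec_naive_check_general_sink
  exact pvPortsAgree A
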